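-- pv_equiv track=rewrite | github.com/pferme/MAC_NS_LP | Symmetrized_LP_MAC_NS.py | enumerateOrbits
-- ===== SOURCE A (Python) =====
-- def enumerateOrbits(Z,n,offset=0):
--     # Enumerate increasing lists of {offset,...,Z-1+offset} of size n
--     if n <= 0:
--         raise Exception ('n should be a positive integer')
--     elif n == 1:
--         return [[i+offset] for i in range(Z)]
--     else:
--         liste = []
--         for k in range(Z):
--             liste = liste + [[k+offset]+l for l in enumerateOrbits(Z-k,n-1,k+offset)]
--         return liste
-- ===== SOURCE B (Python) =====
-- import itertools
--
-- def enumerateOrbits(Z, n, offset=0):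
--     # Enumerate non-decreasing lists over {offset,...,offset+Z-1} of size n,
--     # in lexicographic order, without recursion.
--     if n <= 0:
--         raise Exception('n should be a positive integer')
--     if Z <= 0:
--         return []
--     return [list(c) for c in itertools.combinations_with_replacement(range(offset, offset + Z), n)]
-- ===== Notes on version B (the rewrite author's own statement) =====
-- stated objective: simpler
-- what changed: Replaces the hand-written recursion (with quadratic list concatenation at every level) by a single call to itertools.combinations_with_replacement over range(offset, offset+Z), which yields the same non-decreasing lists in the same lexicographic order.
import Mathlib
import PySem

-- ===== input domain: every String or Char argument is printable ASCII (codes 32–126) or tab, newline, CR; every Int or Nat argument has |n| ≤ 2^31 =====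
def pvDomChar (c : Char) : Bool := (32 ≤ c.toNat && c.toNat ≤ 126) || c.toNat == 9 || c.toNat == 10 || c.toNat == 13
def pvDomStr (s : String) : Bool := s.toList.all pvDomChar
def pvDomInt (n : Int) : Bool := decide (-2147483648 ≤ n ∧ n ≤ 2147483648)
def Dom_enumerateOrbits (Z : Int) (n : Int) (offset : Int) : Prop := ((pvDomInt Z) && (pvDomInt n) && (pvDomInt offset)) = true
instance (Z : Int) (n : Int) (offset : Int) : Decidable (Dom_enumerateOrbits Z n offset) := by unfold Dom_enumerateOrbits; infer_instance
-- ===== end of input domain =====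

-- B replaces the hand-written recursion by a single combinations-with-replacement
-- enumeration over range(offset, offset+Z); return values proved equal on Pre_ (n ≥ 1).

-- ===== PORT A =====
def enumerateOrbits (Z : Int) (n : Int) (offset : Int) : List (List Int) :=
  if _h1 : n ≤ 0 then []   -- Python raises Exception here; excluded by Pre_
  else if _h2 : n = 1 then (PySem.List.pyRange 0 Z 1).map (fun i => [i + offset])
  else
    (PySem.List.pyRange 0 Z 1).foldl
      (fun liste k =>
        liste ++ (enumerateOrbits (Z - k) (n - 1) (k + offset)).map (fun l => (k + offset) :: l))
      []
termination_by n.toNat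
decreasing_by omega

-- ===== PORT B =====
-- port of itertools.combinations_with_replacement(pool, m): lexicographic,
-- non-decreasing selections with repetition from the pool
def combosWithRepl : List Int → Nat → List (List Int)
  | _, 0 => [[]]
  | [], _ + 1 => []
  | x :: rest, m + 1 =>
      (combosWithRepl (x :: rest) m).map (fun c => x :: c) ++ combosWithRepl rest (m + 1)
termination_by xs m => xs.length + m

def enumerateOrbits_alt (Z : Int) (n : Int) (offset : Int) : List (List Int) :=
  if n ≤ 0 then []   -- Python raises Exception here; excluded by Pre_
  else if Z ≤ 0 then []
  else combosWithRepl (PySem.List.pyRange offset (offset + Z) 1) n.toNat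

-- ===== PRECONDITION & SPEC =====
-- Pre_ excludes n ≤ 0, where both Pythons raise Exception('n should be a positive integer').
def Pre_enumerateOrbits (Z : Int) (n : Int) (offset : Int) : Prop := 1 ≤ n
instance (Z : Int) (n : Int) (offset : Int) : Decidable (Pre_enumerateOrbits Z n offset) := by unfold Pre_enumerateOrbits; infer_instance
def pvWitness_enumerateOrbits : Int × Int × Int := (3, 2, 1)

def Spec_enumerateOrbits (Z : Int) (n : Int) (offset : Int) (out : List (List Int)) : Prop := out = enumerateOrbits_alt Z n offset
instance (Z : Int) (n : Int) (offset : Int) (out : List (List Int)) : Decidable (Spec_enumerateOrbits Z n offset out) := by unfold Spec_enumerateOrbits; infer_instance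

-- ===== CLAIM (what is proved, stated in full; the proofs are below) =====
def Claim_equal_enumerateOrbits : Prop := ∀ (Z : Int) (n : Int) (offset : Int), Dom_enumerateOrbits Z n offset → Pre_enumerateOrbits Z n offset → Spec_enumerateOrbits Z n offset (enumerateOrbits Z n offset)

-- ===== LEMMAS AND PROOFS =====

theorem cwr_one (xs : List Int) : combosWithRepl xs 1 = xs.map (fun x => [x]) := by
  induction xs with
  | nil => simp [combosWithRepl]
  | cons x rest ih => simp [combosWithRepl, ih]

theorem cwr_succ_range (m : Nat) : ∀ (k : Nat) (a b : Int), (b - a).toNat = k →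
    combosWithRepl (PySem.List.pyRange a b 1) (m + 1)
      = (PySem.List.pyRange a b 1).flatMap
          (fun x => (combosWithRepl (PySem.List.pyRange x b 1) m).map (fun c => x :: c)) := by
  intro k
  induction k with
  | zero =>
      intro a b hk
      rw [PySem.List.pyRange_one_eq_nil (by omega)]
      simp [combosWithRepl]
  | succ k ih =>
      intro a b hk
      have hab : a < b := by omega
      rw [PySem.List.pyRange_one_cons hab, List.flatMap_cons, combosWithRepl,
        ih (a + 1) b (by omega), ← PySem.List.pyRange_one_cons hab]

theorem key : ∀ (m : Nat) (Z n offset : Int), 1 ≤ n → n.toNat = m →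
    enumerateOrbits Z n offset = combosWithRepl (PySem.List.pyRange offset (offset + Z) 1) m := by
  intro m
  induction m with
  | zero => intro Z n offset hn hm; omega
  | succ m ih =>
      intro Z n offset hn hm
      by_cases h1 : n = 1
      · subst h1
        have hm0 : m = 0 := by omega
        subst hm0
        rw [enumerateOrbits, dif_neg (show ¬ (1:Int) ≤ 0 by omega), dif_pos rfl, cwr_one]
        simp only [PySem.List.pyRange_one, List.map_map]
        have hz : (offset + Z - offset).toNat = (Z - 0).toNat := by omega
        rw [hz]
        apply List.map_congr_left
        intro j _
        simp only [Function.comp]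
        have : (0 : Int) + (j : Int) + offset = offset + ((0 : Int) + (j : Int)) := by ring
        rw [this]
        simp
      · have hn2 : 2 ≤ n := by omega
        rw [enumerateOrbits]
        simp only [dif_neg (show ¬ n ≤ 0 by omega), dif_neg h1]
        rw [PySem.List.foldl_append_eq_flatMap, List.nil_append]
        have hrec : ∀ k : Int,
            (enumerateOrbits (Z - k) (n - 1) (k + offset)).map (fun l => (k + offset) :: l)
              = (combosWithRepl (PySem.List.pyRange (k + offset) (offset + Z) 1) m).map
                  (fun l => (k + offset) :: l) := by
          intro k
          rw [ih (Z - k) (n - 1) (k + offset) (by omega) (by omega)]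
          have h : k + offset + (Z - k) = offset + Z := by ring
          rw [h]
        rw [cwr_succ_range m (offset + Z - offset).toNat offset (offset + Z) rfl]
        simp only [PySem.List.pyRange_one, List.flatMap_map]
        have hz : (offset + Z - offset).toNat = (Z - 0).toNat := by omega
        rw [hz]
        apply List.flatMap_congr
        intro j _
        rw [hrec (0 + (j : Int))]
        have h : (0 : Int) + (j : Int) + offset = offset + ((0 : Int) + (j : Int)) := by ring
        rw [h]
        have hx : offset + ((0 : Int) + (j : Int)) = offset + (j : Int) := by ring
        rw [hx, PySem.List.pyRange_one]

theorem cwr_nil (m : Nat) (hm : 1 ≤ m) : combosWithRepl [] m = [] := by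
  cases m with
  | zero => omega
  | succ t => simp [combosWithRepl]

-- ===== VERDICT (by name: the statement is the Claim_ definition above) =====
theorem enumerateOrbits_spec : Claim_equal_enumerateOrbits := by
  intro Z n offset _hd hp
  unfold Spec_enumerateOrbits enumerateOrbits_alt
  replace hp : 1 ≤ n := hp
  rw [if_neg (by omega : ¬ n ≤ 0)]
  by_cases hZ : Z ≤ 0
  · rw [if_pos hZ, key n.toNat Z n offset hp rfl,
      PySem.List.pyRange_one_eq_nil (by omega), cwr_nil n.toNat (by omega)]
  · rw [if_neg hZ, key n.toNat Z n offset hp rfl]
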